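-- pv_equiv track=rewrite | github.com/asato99w/lateral_thinking_puzzle | app/poc_v2/eval/check_chain_consistency.py | _derivable_from
-- ===== SOURCE A (Python) =====
-- def _derivable_from(available: set[str], derived_conditions: dict[str, list[list[str]]]) -> set[str]:
--     """available から不動点計算で導出可能な記述素を返す"""
--     derived = set(available)
--     changed = True
--     while changed:
--         changed = False
--         for did, conditions in derived_conditions.items():
--             if did in derived:
--                 continue
--             for cond_group in conditions:
--                 if all(ref in derived for ref in cond_group):
--                     derived.add(did)
--                     changed = True
--                     break
--     return derived - available
-- ===== SOURCE B (Python) =====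
-- def _derivable_from(available: set[str], derived_conditions: dict[str, list[list[str]]]) -> set[str]:
--     """available から不動点計算で導出可能な記述素を返す (worklist / Horn-closure propagation)"""
--     avail = set(available)
--     derived = set(avail)
--     heads = []      # gid -> head condition id of that group
--     count = []      # gid -> number of still-unsatisfied refs of that group
--     waiting = {}    # ref -> list of gids waiting on it
--     queue = []      # newly derived ids, processed once each
--     for did, groups in derived_conditions.items():
--         for group in groups:
--             unsat = set(group) - avail
--             if unsat:
--                 gid = len(heads)
--                 heads.append(did)
--                 count.append(len(unsat))
--                 for r in unsat:
--                     waiting.setdefault(r, []).append(gid)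
--             elif did not in derived:
--                 derived.add(did)
--                 queue.append(did)
--     i = 0
--     while i < len(queue):
--         x = queue[i]
--         i += 1
--         for gid in waiting.get(x, ()):
--             count[gid] -= 1
--             if count[gid] == 0:
--                 did = heads[gid]
--                 if did not in derived:
--                     derived.add(did)
--                     queue.append(did)
--     return derived - avail
-- ===== Notes on version B (the rewrite author's own statement) =====
-- stated objective: alternative
-- what changed: replaces A's repeated full re-scans of all condition groups until a fixed point by a single-pass worklist propagation with a ref-to-waiting-group index and per-group unsatisfied counters (Horn-clause closure)
import Mathlib
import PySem

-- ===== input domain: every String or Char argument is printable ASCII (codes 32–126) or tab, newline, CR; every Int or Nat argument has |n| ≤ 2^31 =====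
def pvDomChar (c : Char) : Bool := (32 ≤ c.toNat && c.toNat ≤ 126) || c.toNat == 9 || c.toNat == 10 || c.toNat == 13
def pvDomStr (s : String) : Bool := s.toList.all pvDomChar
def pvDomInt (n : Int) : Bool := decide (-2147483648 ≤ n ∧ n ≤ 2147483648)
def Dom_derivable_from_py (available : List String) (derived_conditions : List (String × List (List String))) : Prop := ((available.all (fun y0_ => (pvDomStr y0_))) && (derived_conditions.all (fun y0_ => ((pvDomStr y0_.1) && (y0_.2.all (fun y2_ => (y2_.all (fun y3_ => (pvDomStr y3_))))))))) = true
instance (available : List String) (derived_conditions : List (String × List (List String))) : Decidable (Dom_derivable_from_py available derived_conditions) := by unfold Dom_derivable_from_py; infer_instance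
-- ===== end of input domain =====

-- B replaces A's repeated full re-scans to a fixed point by a one-shot worklist propagation
-- (ref -> waiting-group index plus per-group unsatisfied counters); equivalence of the derived SETS
-- is proved. Both Pythons return a set (Python set iteration order is not modelled): both ports
-- return the canonical sorted enumeration of that set, and outputs are compared as finite sets.

-- ===== PORT A =====
-- one pass of the 'while changed' body: for (did, conditions) in the dict, skip if already derived,
-- add did on the first condition group fully contained in derived; state = (derived, changed)
def pvStepA (st : PySem.Set String × Bool) (p : String × List (List String)) :
    PySem.Set String × Bool :=
  if PySem.Set.contains st.1 p.1 then st
  else if p.2.any (fun g => g.all (fun r => PySem.Set.contains st.1 r)) then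
    (PySem.Set.add st.1 p.1, true)
  else st

def pvPassA (rules : List (String × List (List String))) (derived : PySem.Set String) :
    PySem.Set String × Bool :=
  rules.foldl pvStepA (derived, false)

-- the 'while changed' loop; fuel rules.length + 1 passes is proven sufficient below
-- (every pass that sets changed adds at least one new dict key to derived)
def pvLoopA (rules : List (String × List (List String))) : Nat → PySem.Set String → PySem.Set String
  | 0, d => d
  | n + 1, d =>
    let st := pvPassA rules d
    if st.2 then pvLoopA rules n st.1 else st.1

def derivable_from_py (available : List String) (derived_conditions : List (String × List (List String))) : List String :=
  let avail := PySem.Set.ofList available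
  PySem.List.sorted (PySem.Set.diff (pvLoopA derived_conditions (derived_conditions.length + 1) avail) avail) (fun x => x) false

-- ===== PORT B =====
-- init scan, one condition group at a time: groups with unsatisfied refs are registered
-- (heads/count/waiting); groups already satisfied by `available` fire their head immediately.
structure PvBState where
  derived : PySem.Set String
  heads : List String
  count : List Int
  waiting : PySem.Dict String (List Nat)
  queue : List String
deriving Repr, DecidableEq

def pvRegWait (gid : Nat) (w : PySem.Dict String (List Nat)) (r : String) :
    PySem.Dict String (List Nat) :=
  w.insert r (w.getD r [] ++ [gid])

def pvInitGroup (avail : PySem.Set String) (st : PvBState) (did : String) (g : List String) : PvBState :=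
  let unsat : PySem.Set String := PySem.Set.diff (PySem.Set.ofList g) avail
  if !unsat.isEmpty then
    let gid := st.heads.length
    { st with heads := st.heads ++ [did], count := st.count ++ [(unsat.length : Int)],
              waiting := unsat.foldl (pvRegWait gid) st.waiting }
  else if PySem.Set.contains st.derived did then st
  else { st with derived := PySem.Set.add st.derived did, queue := st.queue ++ [did] }

def pvInitB (avail : PySem.Set String) (rules : List (String × List (List String))) : PvBState :=
  rules.foldl (fun st p => p.2.foldl (fun st g => pvInitGroup avail st p.1 g) st)
    ⟨avail, [], [], PySem.Dict.empty, []⟩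

-- processing one popped ref x: decrement every group waiting on x, fire heads whose counter hits 0
-- (indices produced by the init scan are always in range, so the total getD/set forms are exact)
def pvDecr (heads : List String) (s : List Int × PySem.Set String × List String) (gid : Nat) :
    List Int × PySem.Set String × List String :=
  let c := s.1.set gid (s.1.getD gid 0 - 1)
  if c.getD gid 0 == 0 then
    let did := heads.getD gid ""
    if PySem.Set.contains s.2.1 did then (c, s.2.1, s.2.2)
    else (c, PySem.Set.add s.2.1 did, s.2.2 ++ [did])
  else (c, s.2.1, s.2.2)

def pvStepB (heads : List String) (waiting : PySem.Dict String (List Nat)) (x : String)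
    (s : List Int × PySem.Set String × List String) : List Int × PySem.Set String × List String :=
  (waiting.getD x []).foldl (pvDecr heads) s

-- the 'while i < len(queue)' loop; fuel rules.length + 1 pops is proven sufficient below
-- (each queue element is a distinct dict key)
def pvLoopB (heads : List String) (waiting : PySem.Dict String (List Nat)) :
    Nat → List Int → PySem.Set String → List String → Nat → PySem.Set String
  | 0, _, derived, _, _ => derived
  | fuel + 1, count, derived, queue, i =>
    if i < queue.length then
      let x := queue.getD i ""
      let s := pvStepB heads waiting x (count, derived, queue)
      pvLoopB heads waiting fuel s.1 s.2.1 s.2.2 (i + 1)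
    else derived

def derivable_from_py_alt (available : List String) (derived_conditions : List (String × List (List String))) : List String :=
  let avail := PySem.Set.ofList available
  let st := pvInitB avail derived_conditions
  let derived := pvLoopB st.heads st.waiting (derived_conditions.length + 1) st.count st.derived st.queue 0
  PySem.List.sorted (PySem.Set.diff derived avail) (fun x => x) false

-- ===== PRECONDITION & SPEC =====
def Spec_derivable_from_py (available : List String) (derived_conditions : List (String × List (List String))) (out : List String) : Prop := out = derivable_from_py_alt available derived_conditions
instance (available : List String) (derived_conditions : List (String × List (List String))) (out : List String) : Decidable (Spec_derivable_from_py available derived_conditions out) := by unfold Spec_derivable_from_py; infer_instance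

-- ===== CLAIM (what is proved, stated in full; the proofs are below) =====
def Claim_equal_derivable_from_py : Prop := ∀ (available : List String) (derived_conditions : List (String × List (List String))), Dom_derivable_from_py available derived_conditions → Spec_derivable_from_py available derived_conditions (derivable_from_py available derived_conditions)

-- ===== LEMMAS AND PROOFS =====

-- condition ids derivable from `available` by the rules (the Horn closure both programs compute)
inductive PvDeriv (available : List String) (rules : List (String × List (List String))) : String → Prop
  | base (x : String) (h : x ∈ available) : PvDeriv available rules x
  | step (did : String) (gs : List (List String)) (g : List String)
      (hr : (did, gs) ∈ rules) (hg : g ∈ gs) (ih : ∀ r ∈ g, PvDeriv available rules r) :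
      PvDeriv available rules did

def pvKeys (rules : List (String × List (List String))) : List String := rules.map Prod.fst

def pvClosed (rules : List (String × List (List String))) (d : List String) : Prop :=
  ∀ p ∈ rules, ∀ g ∈ p.2, (∀ r ∈ g, r ∈ d) → p.1 ∈ d

def pvMissing (rules : List (String × List (List String))) (d : List String) : Nat :=
  ((pvKeys rules).toFinset \ d.toFinset).card

lemma pvComplete (available : List String) (rules : List (String × List (List String)))
    (d : List String) (hav : ∀ x ∈ available, x ∈ d) (hcl : pvClosed rules d) :
    ∀ x, PvDeriv available rules x → x ∈ d := by
  intro x h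
  induction h with
  | base x hx => exact hav x hx
  | step did gs g hr hg ih ih2 => exact hcl (did, gs) hr g hg ih2

lemma pvMissing_lt (rules : List (String × List (List String))) (d d' : List String)
    (hsub : ∀ x ∈ d, x ∈ d') (x : String) (hxk : x ∈ pvKeys rules) (hxd' : x ∈ d') (hxd : x ∉ d) :
    pvMissing rules d' < pvMissing rules d := by
  apply Finset.card_lt_card
  constructor
  · intro k hk
    simp only [Finset.mem_sdiff, List.mem_toFinset] at hk ⊢
    exact ⟨hk.1, fun hkd => hk.2 (hsub k hkd)⟩
  · intro hsub2
    have hx : x ∈ (pvKeys rules).toFinset \ d.toFinset := by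
      simp only [Finset.mem_sdiff, List.mem_toFinset]; exact ⟨hxk, hxd⟩
    have := hsub2 hx
    simp only [Finset.mem_sdiff, List.mem_toFinset] at this
    exact this.2 hxd'

lemma pvMissing_le (rules : List (String × List (List String))) (d : List String) :
    pvMissing rules d ≤ rules.length := by
  calc pvMissing rules d ≤ (pvKeys rules).toFinset.card :=
        Finset.card_le_card Finset.sdiff_subset
    _ ≤ (pvKeys rules).length := List.toFinset_card_le _
    _ = rules.length := List.length_map ..

-- everything the A-side pass fold guarantees, over any sublist l of the rules
lemma pvPassA_go (available : List String) (rules : List (String × List (List String)))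
    (l : List (String × List (List String))) (hl : ∀ p ∈ l, p ∈ rules) :
    ∀ st0 : PySem.Set String × Bool,
      (∀ x ∈ st0.1, x ∈ (l.foldl pvStepA st0).1) ∧
      (∀ x ∈ (l.foldl pvStepA st0).1, x ∈ st0.1 ∨ x ∈ pvKeys rules) ∧
      (st0.1.Nodup → (l.foldl pvStepA st0).1.Nodup) ∧
      ((∀ x ∈ st0.1, PvDeriv available rules x) →
        ∀ x ∈ (l.foldl pvStepA st0).1, PvDeriv available rules x) ∧
      ((l.foldl pvStepA st0).2 = false →
        (l.foldl pvStepA st0).1 = st0.1 ∧ st0.2 = false ∧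
        ∀ p ∈ l, ∀ g ∈ p.2, (∀ r ∈ g, r ∈ st0.1) → p.1 ∈ st0.1) ∧
      (st0.2 = false → (l.foldl pvStepA st0).2 = true → ∃ x ∈ (l.foldl pvStepA st0).1, x ∉ st0.1) := by
  induction l with
  | nil =>
    intro st0
    exact ⟨fun x hx => hx, fun x hx => Or.inl hx, id, fun h => h,
      fun h => ⟨rfl, h, by simp⟩, fun h1 h2 => by simp [h1] at h2⟩
  | cons p rest ih =>
    intro st0
    have hp : p ∈ rules := hl p (List.mem_cons_self ..)
    have hrest : ∀ q ∈ rest, q ∈ rules := fun q hq => hl q (List.mem_cons_of_mem _ hq)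
    have ihr := ih hrest
    simp only [List.foldl_cons]
    by_cases hc : PySem.Set.contains st0.1 p.1 = true
    · have hst1 : pvStepA st0 p = st0 := by unfold pvStepA; rw [if_pos hc]
      rw [hst1]
      obtain ⟨i1, i2, i3, i4, i5, i6⟩ := ihr st0
      refine ⟨i1, i2, i3, i4, fun hf => ?_, i6⟩
      obtain ⟨e1, e2, e3⟩ := i5 hf
      refine ⟨e1, e2, fun q hq => ?_⟩
      rcases List.mem_cons.mp hq with h | h
      · subst h; exact fun g _ _ => (PySem.Set.contains_iff _ _).mp hc
      · exact e3 q h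
    · replace hc : p.1 ∉ st0.1 := fun hmem => hc ((PySem.Set.contains_iff _ _).mpr hmem)
      have hcb : PySem.Set.contains st0.1 p.1 = false := by
        rw [← Bool.not_eq_true]; exact fun h => hc ((PySem.Set.contains_iff _ _).mp h)
      by_cases hany : p.2.any (fun g => g.all (fun r => PySem.Set.contains st0.1 r)) = true
      · have hst1 : pvStepA st0 p = (PySem.Set.add st0.1 p.1, true) := by
          simp only [pvStepA]
          rw [if_neg (by simpa [PySem.Set.contains_iff] using hc), if_pos hany]
        rw [hst1]
        obtain ⟨i1, i2, i3, i4, i5, i6⟩ := ihr (PySem.Set.add st0.1 p.1, true)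
        obtain ⟨g, hg, hgall⟩ : ∃ g ∈ p.2, ∀ r ∈ g, r ∈ st0.1 := by
          simp only [List.any_eq_true, List.all_eq_true] at hany
          obtain ⟨g, hg, hall⟩ := hany
          exact ⟨g, hg, fun r hr => (PySem.Set.contains_iff _ _).mp (hall r hr)⟩
        refine ⟨?_, ?_, ?_, ?_, ?_, ?_⟩
        · exact fun x hx => i1 x ((PySem.Set.mem_add _ _ _).mpr (Or.inl hx))
        · intro x hx
          rcases i2 x hx with h | h
          · rcases (PySem.Set.mem_add _ _ _).mp h with h' | h'
            · exact Or.inl h'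
            · exact Or.inr (h' ▸ List.mem_map_of_mem hp)
          · exact Or.inr h
        · exact fun hnd => i3 (PySem.Set.nodup_add _ _ hnd)
        · intro hsound x hx
          refine i4 ?_ x hx
          intro y hy
          rcases (PySem.Set.mem_add _ _ _).mp hy with h' | h'
          · exact hsound y h'
          · subst h'
            exact PvDeriv.step p.1 p.2 g (by simpa using hp) hg (fun r hr => hsound r (hgall r hr))
        · intro hf
          obtain ⟨_, e2, _⟩ := i5 hf
          simp at e2
        · intro _ hf2
          exact ⟨p.1, i1 p.1 ((PySem.Set.mem_add _ _ _).mpr (Or.inr rfl)), hc⟩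
      · have hst1 : pvStepA st0 p = st0 := by
          simp only [pvStepA]
          rw [if_neg (by simpa [PySem.Set.contains_iff] using hc), if_neg hany]
        rw [hst1]
        obtain ⟨i1, i2, i3, i4, i5, i6⟩ := ihr st0
        refine ⟨i1, i2, i3, i4, fun hf => ?_, i6⟩
        obtain ⟨e1, e2, e3⟩ := i5 hf
        refine ⟨e1, e2, fun q hq => ?_⟩
        rcases List.mem_cons.mp hq with h | h
        · subst h
          intro g hg hsat
          exfalso
          apply hany
          simp only [List.any_eq_true, List.all_eq_true]
          exact ⟨g, hg, fun r hr => (PySem.Set.contains_iff _ _).mpr (hsat r hr)⟩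
        · exact e3 q h

lemma pvLoopA_succ (rules : List (String × List (List String))) (n : Nat) (d : PySem.Set String) :
    pvLoopA rules (n + 1) d =
      if (pvPassA rules d).2 then pvLoopA rules n (pvPassA rules d).1 else (pvPassA rules d).1 := rfl

lemma pvLoopA_spec (available : List String) (rules : List (String × List (List String))) :
    ∀ (n : Nat) (d : PySem.Set String), d.Nodup →
      (∀ x ∈ available, x ∈ d) →
      (∀ x ∈ d, PvDeriv available rules x) →
      pvMissing rules d < n →
      (pvLoopA rules n d).Nodup ∧
      (∀ x ∈ available, x ∈ pvLoopA rules n d) ∧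
      (∀ x ∈ pvLoopA rules n d, PvDeriv available rules x) ∧
      pvClosed rules (pvLoopA rules n d) := by
  intro n
  induction n with
  | zero => intro d _ _ _ h; omega
  | succ n ih =>
    intro d hnd hav hsound hmiss
    obtain ⟨i1, i2, i3, i4, i5, i6⟩ := pvPassA_go available rules rules (fun _ h => h) (d, false)
    have hpa : pvPassA rules d = rules.foldl pvStepA (d, false) := rfl
    rw [pvLoopA_succ]
    cases hfl : (pvPassA rules d).2 with
    | false =>
      rw [if_neg (by simp)]
      obtain ⟨e1, _, e3⟩ := i5 (by rw [← hpa]; exact hfl)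
      rw [← hpa] at e1
      rw [e1]
      exact ⟨hnd, hav, hsound, fun p hp g hg hs => e3 p hp g hg hs⟩
    | true =>
      rw [if_pos (by simp)]
      rw [hpa] at hfl
      rw [hpa]
      obtain ⟨x, hx1, hx2⟩ := i6 rfl hfl
      have hxk : x ∈ pvKeys rules := by
        rcases i2 x hx1 with h | h
        · exact absurd h hx2
        · exact h
      have hlt : pvMissing rules (rules.foldl pvStepA (d, false)).1 < pvMissing rules d :=
        pvMissing_lt rules d _ i1 x hxk hx1 hx2
      exact ih _ (i3 hnd) (fun y hy => i1 y (hav y hy)) (i4 hsound) (by omega)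

lemma pvA_char (available : List String) (rules : List (String × List (List String))) :
    (pvLoopA rules (rules.length + 1) (PySem.Set.ofList available)).Nodup ∧
    (∀ x, x ∈ pvLoopA rules (rules.length + 1) (PySem.Set.ofList available) ↔
      PvDeriv available rules x) := by
  obtain ⟨hnd, hav, hsound, hcl⟩ := pvLoopA_spec available rules (rules.length + 1)
    (PySem.Set.ofList available) (PySem.Set.nodup_ofList _)
    (fun x hx => (PySem.Set.mem_ofList _ _).mpr hx)
    (fun x hx => PvDeriv.base x ((PySem.Set.mem_ofList _ _).mp hx))
    (by have := pvMissing_le rules (PySem.Set.ofList available); omega)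
  exact ⟨hnd, fun x => ⟨hsound x, fun h => pvComplete available rules _ hav hcl x h⟩⟩

-- ---- B-side spec objects: the flattened (head, group) pairs, the registered groups, their
-- unsatisfied-ref sets, and the waiting lists / counters the init scan builds ----
def pvPairs (rules : List (String × List (List String))) : List (String × List String) :=
  rules.flatMap (fun p => p.2.map (fun g => (p.1, g)))

def pvUns (avail : PySem.Set String) (g : List String) : PySem.Set String :=
  PySem.Set.diff (PySem.Set.ofList g) avail

def pvRegs (avail : PySem.Set String) (rules : List (String × List (List String))) :
    List (String × List String) :=
  (pvPairs rules).filter (fun pg => !(pvUns avail pg.2).isEmpty)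

def pvIStep (avail : PySem.Set String) (st : PvBState) (pg : String × List String) : PvBState :=
  pvInitGroup avail st pg.1 pg.2

def pvInit0 (avail : PySem.Set String) : PvBState := ⟨avail, [], [], PySem.Dict.empty, []⟩

lemma pvInitB_eq (avail : PySem.Set String) (rules : List (String × List (List String))) :
    pvInitB avail rules = (pvPairs rules).foldl (pvIStep avail) (pvInit0 avail) := by
  unfold pvInitB pvInit0
  generalize (⟨avail, [], [], PySem.Dict.empty, []⟩ : PvBState) = s0
  induction rules generalizing s0 with
  | nil => rfl
  | cons p rest ih =>
    have hpp : pvPairs (p :: rest) = p.2.map (fun g => (p.1, g)) ++ pvPairs rest := by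
      simp [pvPairs]
    rw [List.foldl_cons, hpp, List.foldl_append, List.foldl_map, ih]
    rfl

lemma pvRegWait_fold (gid : Nat) :
    ∀ (u : List String), u.Nodup →
    ∀ (w : PySem.Dict String (List Nat)) (r : String),
      (u.foldl (pvRegWait gid) w).getD r [] =
        if r ∈ u then w.getD r [] ++ [gid] else w.getD r [] := by
  intro u
  induction u with
  | nil => intro _ w r; simp
  | cons r0 rest ih =>
    intro hu w r
    rw [List.foldl_cons]
    rw [ih hu.of_cons]
    by_cases hr : r = r0
    · subst hr
      have hnr : r ∉ rest := (List.nodup_cons.mp hu).1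
      rw [if_neg hnr, if_pos (List.mem_cons_self ..)]
      unfold pvRegWait
      rw [PySem.Dict.getD_insert]
      simp
    · have h2 : (pvRegWait gid w r0).getD r [] = w.getD r [] := by
        unfold pvRegWait
        rw [PySem.Dict.getD_insert, if_neg hr]
      rw [h2]
      by_cases hm : r ∈ rest
      · rw [if_pos hm, if_pos (List.mem_cons_of_mem _ hm)]
      · rw [if_neg hm, if_neg (by simp [hr, hm])]

-- full characterization of the init scan over an arbitrary pair list
lemma pvInit_go (avail : PySem.Set String) (hand : avail.Nodup) (pairs : List (String × List String)) :
    ((pairs.foldl (pvIStep avail) (pvInit0 avail)).heads =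
      (pairs.filter (fun pg => !(pvUns avail pg.2).isEmpty)).map Prod.fst) ∧
    ((pairs.foldl (pvIStep avail) (pvInit0 avail)).count =
      (pairs.filter (fun pg => !(pvUns avail pg.2).isEmpty)).map
        (fun pg => ((pvUns avail pg.2).length : Int))) ∧
    (∀ r, (pairs.foldl (pvIStep avail) (pvInit0 avail)).waiting.getD r [] =
      (List.range (pairs.filter (fun pg => !(pvUns avail pg.2).isEmpty)).length).filter
        (fun gid => decide (r ∈ pvUns avail
          (((pairs.filter (fun pg => !(pvUns avail pg.2).isEmpty)).getD gid ("", [])).2)))) ∧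
    ((pairs.foldl (pvIStep avail) (pvInit0 avail)).derived =
      avail ++ (pairs.foldl (pvIStep avail) (pvInit0 avail)).queue) ∧
    ((pairs.foldl (pvIStep avail) (pvInit0 avail)).derived.Nodup) ∧
    (∀ x ∈ (pairs.foldl (pvIStep avail) (pvInit0 avail)).queue,
      ∃ pg ∈ pairs, pg.1 = x ∧ (pvUns avail pg.2).isEmpty) ∧
    (∀ pg ∈ pairs, (pvUns avail pg.2).isEmpty →
      pg.1 ∈ (pairs.foldl (pvIStep avail) (pvInit0 avail)).derived) := by
  induction pairs using List.reverseRecOn with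
  | nil =>
    refine ⟨rfl, rfl, fun r => by simp [pvInit0], by simp [pvInit0], by simpa [pvInit0] using hand,
      by simp [pvInit0], by simp⟩
  | append_singleton l pg ih =>
    obtain ⟨ihh, ihc, ihw, ihd, ihnd, ihq, ihf⟩ := ih
    rw [List.foldl_append] at *
    set st := l.foldl (pvIStep avail) (pvInit0 avail) with hst
    set reg := l.filter (fun pg => !(pvUns avail pg.2).isEmpty) with hreg
    rw [List.foldl_cons, List.foldl_nil]
    by_cases hne : (pvUns avail pg.2).isEmpty = true
    · -- group already satisfied by avail: fire (or skip)
      have hfilter : (l ++ [pg]).filter (fun pg => !(pvUns avail pg.2).isEmpty) = reg := by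
        rw [List.filter_append]; rw [← hreg]; simp [hne]
      have hstep : pvIStep avail st pg =
          if PySem.Set.contains st.derived pg.1 then st
          else { st with derived := PySem.Set.add st.derived pg.1, queue := st.queue ++ [pg.1] } := by
        unfold pvIStep pvInitGroup
        rw [if_neg (by rw [show PySem.Set.diff (PySem.Set.ofList pg.2) avail = pvUns avail pg.2 from rfl, hne]; simp)]
      rw [hstep]
      by_cases hc : PySem.Set.contains st.derived pg.1 = true
      · rw [if_pos hc, hfilter]
        refine ⟨ihh, ihc, ihw, ihd, ihnd, ?_, ?_⟩
        · intro x hx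
          obtain ⟨pg', h1, h2, h3⟩ := ihq x hx
          exact ⟨pg', List.mem_append_left _ h1, h2, h3⟩
        · intro pg' hpg' he
          rcases List.mem_append.mp hpg' with h | h
          · exact ihf pg' h he
          · simp at h; subst h; exact (PySem.Set.contains_iff _ _).mp hc
      · rw [if_neg hc, hfilter]
        have hnotmem : pg.1 ∉ st.derived := fun hm => hc ((PySem.Set.contains_iff _ _).mpr hm)
        have hadd : PySem.Set.add st.derived pg.1 = st.derived ++ [pg.1] :=
          PySem.Set.add_of_not_mem hnotmem
        refine ⟨ihh, ihc, ihw, ?_, ?_, ?_, ?_⟩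
        · rw [hadd, ihd, List.append_assoc]
        · rw [hadd]; exact List.Nodup.append ihnd (List.nodup_singleton _) (by simpa using hnotmem)
        · intro x hx
          rcases List.mem_append.mp hx with h | h
          · obtain ⟨pg', h1, h2, h3⟩ := ihq x h
            exact ⟨pg', List.mem_append_left _ h1, h2, h3⟩
          · simp at h; subst h
            exact ⟨pg, List.mem_append_right _ (List.mem_singleton_self _), rfl, hne⟩
        · intro pg' hpg' he
          rcases List.mem_append.mp hpg' with h | h
          · rw [hadd]; exact List.mem_append_left _ (ihf pg' h he)
          · simp at h; subst h; rw [hadd]; simp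
    · -- group has unsatisfied refs: register it as gid = reg.length
      have hfilter : (l ++ [pg]).filter (fun pg => !(pvUns avail pg.2).isEmpty) = reg ++ [pg] := by
        rw [List.filter_append]; rw [← hreg]; simp [hne]
      have hstep : pvIStep avail st pg =
          { st with heads := st.heads ++ [pg.1],
                    count := st.count ++ [((pvUns avail pg.2).length : Int)],
                    waiting := (pvUns avail pg.2).foldl (pvRegWait st.heads.length) st.waiting } := by
        unfold pvIStep pvInitGroup
        rw [if_pos (by rw [show PySem.Set.diff (PySem.Set.ofList pg.2) avail = pvUns avail pg.2 from rfl]; simpa using hne)]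
        rfl
      rw [hstep, hfilter]
      have hlen : st.heads.length = reg.length := by rw [ihh, List.length_map]
      refine ⟨?_, ?_, ?_, ihd, ihnd, ?_, ?_⟩
      · simp [ihh]
      · simp [ihc]
      · intro r
        show ((pvUns avail pg.2).foldl (pvRegWait st.heads.length) st.waiting).getD r [] = _
        rw [pvRegWait_fold st.heads.length (pvUns avail pg.2)
            (PySem.Set.nodup_diff _ _ (PySem.Set.nodup_ofList _)) st.waiting r]
        rw [ihw r, hlen]
        have hrange : List.range (reg ++ [pg]).length = List.range reg.length ++ [reg.length] := by
          simp [List.range_succ]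
        rw [hrange, List.filter_append]
        have hcong : (List.range reg.length).filter
              (fun gid => decide (r ∈ pvUns avail (((reg ++ [pg]).getD gid ("", [])).2)))
            = (List.range reg.length).filter
              (fun gid => decide (r ∈ pvUns avail ((reg.getD gid ("", [])).2))) := by
          apply List.filter_congr
          intro gid hgid
          have hlt : gid < reg.length := List.mem_range.mp hgid
          rw [List.getD_append _ _ _ _ hlt]
        rw [hcong]
        have hlast : (reg ++ [pg]).getD reg.length ("", []) = pg := by
          rw [List.getD_append_right _ _ _ _ (le_refl _)]
          simp
        by_cases hmem : r ∈ pvUns avail pg.2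
        · rw [if_pos hmem]
          have hone : List.filter
              (fun gid => decide (r ∈ pvUns avail (((reg ++ [pg]).getD gid ("", [])).2)))
              [reg.length] = [reg.length] := by
            simp only [List.filter_cons, List.filter_nil, hlast]
            simp [hmem]
          rw [hone]
        · rw [if_neg hmem]
          have hnone : List.filter
              (fun gid => decide (r ∈ pvUns avail (((reg ++ [pg]).getD gid ("", [])).2)))
              [reg.length] = [] := by
            simp only [List.filter_cons, List.filter_nil, hlast]
            simp [hmem]
          rw [hnone, List.append_nil]
      · intro x hx
        obtain ⟨pg', h1, h2, h3⟩ := ihq x hx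
        exact ⟨pg', List.mem_append_left _ h1, h2, h3⟩
      · intro pg' hpg' he
        rcases List.mem_append.mp hpg' with h | h
        · exact ihf pg' h he
        · simp at h; subst h; exact absurd he (by simp [hne])

-- ---- B-side loop objects: per-group unsatisfied sets, heads, counters relative to a processed list ----
def pvUsG (avail : PySem.Set String) (rules : List (String × List (List String))) (gid : Nat) :
    PySem.Set String :=
  pvUns avail (((pvRegs avail rules).getD gid ("", [])).2)

def pvHeadG (avail : PySem.Set String) (rules : List (String × List (List String))) (gid : Nat) :
    String :=
  ((pvRegs avail rules).getD gid ("", [])).1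

def pvCnt (avail : PySem.Set String) (rules : List (String × List (List String)))
    (P : List String) (gid : Nat) : Nat :=
  ((pvUsG avail rules gid).filter (fun r => !decide (r ∈ P))).length

lemma pvGetD_set_self (c : List Int) (i : Nat) (h : i < c.length) (v : Int) :
    (c.set i v).getD i 0 = v := by
  rw [List.getD_eq_getElem?_getD, List.getElem?_set_self (by simpa using h)]; rfl

lemma pvGetD_set_ne (c : List Int) (i j : Nat) (h : i ≠ j) (v : Int) :
    (c.set i v).getD j 0 = c.getD j 0 := by
  rw [List.getD_eq_getElem?_getD, List.getElem?_set_ne h, ← List.getD_eq_getElem?_getD]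

lemma pvHeads_getD (avail : PySem.Set String) (rules : List (String × List (List String)))
    (gid : Nat) (h : gid < (pvRegs avail rules).length) :
    ((pvRegs avail rules).map Prod.fst).getD gid "" = pvHeadG avail rules gid := by
  rw [List.getD_eq_getElem _ _ (by simpa using h), List.getElem_map, pvHeadG,
    List.getD_eq_getElem _ _ h]

lemma pvUsG_nodup (avail : PySem.Set String) (rules : List (String × List (List String)))
    (gid : Nat) : (pvUsG avail rules gid).Nodup :=
  PySem.Set.nodup_diff _ _ (PySem.Set.nodup_ofList _)

lemma pvCnt_decr (avail : PySem.Set String) (rules : List (String × List (List String)))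
    (gid : Nat) (P : List String) (x : String)
    (hx : x ∈ pvUsG avail rules gid) (hxP : x ∉ P) :
    (pvCnt avail rules (P ++ [x]) gid : Int) = (pvCnt avail rules P gid : Int) - 1 := by
  have hpt : ∀ r ∈ pvUsG avail rules gid,
      (!decide (r ∈ P ++ [x])) = ((r != x) && !decide (r ∈ P)) := by
    intro r _
    by_cases h1 : r = x <;> by_cases h2 : r ∈ P <;> simp [h1, h2, hxP, List.mem_append]
  have h1 : pvCnt avail rules (P ++ [x]) gid =
      ((pvUsG avail rules gid).filter (fun r => (r != x) && !decide (r ∈ P))).length := by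
    unfold pvCnt; rw [List.filter_congr hpt]
  have h2 : (pvUsG avail rules gid).filter (fun r => (r != x) && !decide (r ∈ P)) =
      ((pvUsG avail rules gid).filter (fun r => !decide (r ∈ P))).erase x := by
    rw [List.Nodup.erase_eq_filter (List.Nodup.filter _ (pvUsG_nodup avail rules gid)) x,
      List.filter_filter]
  have hxA : x ∈ (pvUsG avail rules gid).filter (fun r => !decide (r ∈ P)) :=
    List.mem_filter.mpr ⟨hx, by simp [hxP]⟩
  have h3 := List.length_erase_of_mem hxA
  have h4 : 1 ≤ pvCnt avail rules P gid := by
    unfold pvCnt; exact List.length_pos_of_mem hxA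
  have h5 : pvCnt avail rules (P ++ [x]) gid = pvCnt avail rules P gid - 1 := by
    rw [h1, h2, h3]; rfl
  omega

lemma pvCnt_same (avail : PySem.Set String) (rules : List (String × List (List String)))
    (gid : Nat) (P : List String) (x : String) (hx : x ∉ pvUsG avail rules gid) :
    pvCnt avail rules (P ++ [x]) gid = pvCnt avail rules P gid := by
  unfold pvCnt
  rw [List.filter_congr]
  intro r hr
  have hne : r ≠ x := fun h => hx (h ▸ hr)
  simp [List.mem_append, hne]

lemma pvCnt_zero_iff (avail : PySem.Set String) (rules : List (String × List (List String)))
    (gid : Nat) (P : List String) :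
    pvCnt avail rules P gid = 0 ↔ ∀ r ∈ pvUsG avail rules gid, r ∈ P := by
  unfold pvCnt
  rw [List.length_eq_zero_iff, List.filter_eq_nil_iff]
  simp

lemma pvMissing_pop (rules : List (String × List (List String))) (d : List String) (did : String)
    (hk : did ∈ pvKeys rules) (hnd : did ∉ d) :
    pvMissing rules (d ++ [did]) + 1 = pvMissing rules d := by
  unfold pvMissing
  have h1 : (d ++ [did]).toFinset = insert did d.toFinset := by
    simp [List.toFinset_append, Finset.union_comm]
  have hmem : did ∈ (pvKeys rules).toFinset \ d.toFinset := by
    simp only [Finset.mem_sdiff, List.mem_toFinset]; exact ⟨hk, hnd⟩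
  rw [h1, Finset.sdiff_insert, Finset.card_erase_of_mem hmem]
  have : 0 < ((pvKeys rules).toFinset \ d.toFinset).card := Finset.card_pos.mpr ⟨did, hmem⟩
  omega

lemma pvPairs_mem {rules : List (String × List (List String))} {pg : String × List String}
    (h : pg ∈ pvPairs rules) : ∃ gs, (pg.1, gs) ∈ rules ∧ pg.2 ∈ gs := by
  simp only [pvPairs, List.mem_flatMap, List.mem_map] at h
  obtain ⟨p, hp, g, hg, heq⟩ := h
  rw [← heq]
  exact ⟨p.2, by simpa using hp, hg⟩

lemma pvPairs_mem_of (rules : List (String × List (List String))) (did : String)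
    (gs : List (List String)) (g : List String) (h1 : (did, gs) ∈ rules) (h2 : g ∈ gs) :
    (did, g) ∈ pvPairs rules := by
  simp only [pvPairs, List.mem_flatMap, List.mem_map]
  exact ⟨(did, gs), h1, g, h2, rfl⟩

lemma pvDeriv_of_group (available : List String) (rules : List (String × List (List String)))
    (did : String) (g : List String) (hmem : (did, g) ∈ pvPairs rules)
    (hrefs : ∀ r ∈ g, PvDeriv available rules r) : PvDeriv available rules did := by
  obtain ⟨gs, h1, h2⟩ := pvPairs_mem hmem
  exact PvDeriv.step did gs g h1 h2 hrefs

lemma pvRegs_getD_mem (avail : PySem.Set String) (rules : List (String × List (List String)))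
    (gid : Nat) (h : gid < (pvRegs avail rules).length) :
    (pvRegs avail rules).getD gid ("", []) ∈ pvRegs avail rules := by
  rw [List.getD_eq_getElem _ _ h]; exact List.getElem_mem _

lemma pvUns_cover (avail : PySem.Set String) (g : List String) (r : String) (hr : r ∈ g) :
    r ∈ avail ∨ r ∈ pvUns avail g := by
  by_cases h : r ∈ avail
  · exact Or.inl h
  · exact Or.inr ((PySem.Set.mem_diff _ _ _).mpr ⟨(PySem.Set.mem_ofList _ _).mpr hr, h⟩)

lemma pvUns_sub (avail : PySem.Set String) (g : List String) (r : String)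
    (hr : r ∈ pvUns avail g) : r ∈ g ∧ r ∉ avail := by
  have := (PySem.Set.mem_diff _ _ _).mp hr
  exact ⟨(PySem.Set.mem_ofList _ _).mp this.1, this.2⟩

-- one popped ref x: the decrement fold over its waiting list, full invariant transfer
lemma pvDecr_go (available : List String) (rules : List (String × List (List String)))
    (avail : PySem.Set String) (havl : avail = PySem.Set.ofList available)
    (heads : List String) (hheads : heads = (pvRegs avail rules).map Prod.fst)
    (P : List String) (x : String) (hxP : x ∉ P) :
    ∀ (gl : List Nat) (c : List Int) (d q : List String),
      gl.Nodup →
      (∀ gid ∈ gl, gid < (pvRegs avail rules).length ∧ x ∈ pvUsG avail rules gid ∧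
        c.getD gid 0 = (pvCnt avail rules P gid : Int)) →
      c.length = (pvRegs avail rules).length →
      (∀ gid, gid < (pvRegs avail rules).length → gid ∉ gl →
        c.getD gid 0 = (pvCnt avail rules (P ++ [x]) gid : Int)) →
      (∀ gid, gid < (pvRegs avail rules).length → gid ∉ gl →
        (∀ r ∈ pvUsG avail rules gid, r ∈ P ++ [x]) → pvHeadG avail rules gid ∈ d) →
      d = avail ++ q →
      d.Nodup →
      (∀ y ∈ d, PvDeriv available rules y) →
      (∀ y ∈ q, y ∈ pvKeys rules) →
      (∀ r ∈ P ++ [x], r ∈ d) →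
      ((gl.foldl (pvDecr heads) (c, d, q)).1.length = (pvRegs avail rules).length) ∧
      (∀ gid, gid < (pvRegs avail rules).length →
        (gl.foldl (pvDecr heads) (c, d, q)).1.getD gid 0 =
          (pvCnt avail rules (P ++ [x]) gid : Int)) ∧
      (∀ gid, gid < (pvRegs avail rules).length →
        (∀ r ∈ pvUsG avail rules gid, r ∈ P ++ [x]) →
        pvHeadG avail rules gid ∈ (gl.foldl (pvDecr heads) (c, d, q)).2.1) ∧
      (∃ new : List String, (gl.foldl (pvDecr heads) (c, d, q)).2.2 = q ++ new ∧
        (gl.foldl (pvDecr heads) (c, d, q)).2.1 = d ++ new) ∧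
      ((gl.foldl (pvDecr heads) (c, d, q)).2.1.Nodup) ∧
      (∀ y ∈ (gl.foldl (pvDecr heads) (c, d, q)).2.1, PvDeriv available rules y) ∧
      (∀ y ∈ (gl.foldl (pvDecr heads) (c, d, q)).2.2, y ∈ pvKeys rules) ∧
      (pvMissing rules (gl.foldl (pvDecr heads) (c, d, q)).2.1 +
          (gl.foldl (pvDecr heads) (c, d, q)).2.2.length = pvMissing rules d + q.length) ∧
      (∀ r ∈ P ++ [x], r ∈ (gl.foldl (pvDecr heads) (c, d, q)).2.1) := by
  intro gl
  induction gl with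
  | nil =>
    intro c d q _ _ hclen hcnew hfire hdq hnd hsound hkeys hP
    exact ⟨hclen, fun gid h => hcnew gid h (by simp), fun gid h hp => hfire gid h (by simp) hp,
      ⟨[], by simp, by simp⟩, hnd, hsound, hkeys, by simp, hP⟩
  | cons gid0 rest ih =>
    intro c d q hnodup hglmem hclen hcnew hfire hdq hnd hsound hkeys hP
    obtain ⟨hlt0, hx0, hc0⟩ := hglmem gid0 (List.mem_cons_self ..)
    have hg0rest : gid0 ∉ rest := (List.nodup_cons.mp hnodup).1
    have hrestnd : rest.Nodup := (List.nodup_cons.mp hnodup).2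
    have hc'self : (c.set gid0 (c.getD gid0 0 - 1)).getD gid0 0 =
        (pvCnt avail rules (P ++ [x]) gid0 : Int) := by
      rw [pvGetD_set_self c gid0 (by rw [hclen]; exact hlt0), hc0,
        pvCnt_decr avail rules gid0 P x hx0 hxP]
    have hc'ne : ∀ g, g ≠ gid0 → (c.set gid0 (c.getD gid0 0 - 1)).getD g 0 = c.getD g 0 :=
      fun g hg => pvGetD_set_ne c gid0 g (fun h => hg h.symm) _
    rw [List.foldl_cons]
    by_cases hz : pvCnt avail rules (P ++ [x]) gid0 = 0
    · -- counter hits zero: fire the head (if not already derived)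
      have hdid : heads.getD gid0 "" = pvHeadG avail rules gid0 := by
        rw [hheads]; exact pvHeads_getD avail rules gid0 hlt0
      have hcond : ((c.set gid0 (c.getD gid0 0 - 1)).getD gid0 0 == 0) = true := by
        rw [hc'self, hz]; simp
      by_cases hdc : pvHeadG avail rules gid0 ∈ d
      · have hstep : pvDecr heads (c, d, q) gid0 = (c.set gid0 (c.getD gid0 0 - 1), d, q) := by
          unfold pvDecr
          simp only []
          rw [if_pos hcond, hdid,
            if_pos ((PySem.Set.contains_iff _ _).mpr hdc)]
        rw [hstep]
        apply ih _ _ _ hrestnd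
        · intro gid hgid
          obtain ⟨h1, h2, h3⟩ := hglmem gid (List.mem_cons_of_mem _ hgid)
          refine ⟨h1, h2, ?_⟩
          rw [hc'ne gid (fun h => hg0rest (h ▸ hgid)), h3]
        · rw [List.length_set]; exact hclen
        · intro gid h1 h2
          by_cases hg : gid = gid0
          · subst hg; exact hc'self
          · rw [hc'ne gid hg]; exact hcnew gid h1 (by simp [hg, h2])
        · intro gid h1 h2 h3
          by_cases hg : gid = gid0
          · subst hg; exact hdc
          · exact hfire gid h1 (by simp [hg, h2]) h3
        · exact hdq
        · exact hnd
        · exact hsound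
        · exact hkeys
        · exact hP
      · -- genuinely new: add to derived and enqueue
        have hpg : (pvHeadG avail rules gid0, ((pvRegs avail rules).getD gid0 ("", [])).2) ∈
            pvPairs rules := by
          have hmem := List.mem_of_mem_filter (pvRegs_getD_mem avail rules gid0 hlt0)
          simpa [pvHeadG] using hmem
        have hsub : ∀ r ∈ pvUsG avail rules gid0, r ∈ d := fun r hr =>
          hP r ((pvCnt_zero_iff avail rules gid0 (P ++ [x])).mp hz r hr)
        have hderiv : PvDeriv available rules (pvHeadG avail rules gid0) := by
          apply pvDeriv_of_group available rules _ (((pvRegs avail rules).getD gid0 ("", [])).2) hpg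
          intro r hr
          rcases pvUns_cover avail _ r hr with h | h
          · exact hsound r (by rw [hdq]; exact List.mem_append_left _ h)
          · exact hsound r (hsub r h)
        have hkey : pvHeadG avail rules gid0 ∈ pvKeys rules := by
          obtain ⟨gs, h1, _⟩ := pvPairs_mem hpg
          unfold pvKeys
          exact List.mem_map_of_mem h1
        have hstep : pvDecr heads (c, d, q) gid0 =
            (c.set gid0 (c.getD gid0 0 - 1), PySem.Set.add d (pvHeadG avail rules gid0),
              q ++ [pvHeadG avail rules gid0]) := by
          unfold pvDecr
          simp only []
          rw [if_pos hcond, hdid,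
            if_neg (fun h => hdc ((PySem.Set.contains_iff _ _).mp h))]
        have haddapp : PySem.Set.add d (pvHeadG avail rules gid0) =
            d ++ [pvHeadG avail rules gid0] := PySem.Set.add_of_not_mem hdc
        rw [hstep, haddapp]
        have hmiss := pvMissing_pop rules d _ hkey hdc
        obtain ⟨ihclen, ihcnt, ihfire, ⟨new, hq', hd'⟩, ihnd', ihsound', ihkeys', ihmiss', ihP'⟩ :=
          ih (c.set gid0 (c.getD gid0 0 - 1)) (d ++ [pvHeadG avail rules gid0])
            (q ++ [pvHeadG avail rules gid0]) hrestnd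
            (by
              intro gid hgid
              obtain ⟨h1, h2, h3⟩ := hglmem gid (List.mem_cons_of_mem _ hgid)
              exact ⟨h1, h2, by rw [hc'ne gid (fun h => hg0rest (h ▸ hgid))]; exact h3⟩)
            (by rw [List.length_set]; exact hclen)
            (by
              intro gid h1 h2
              by_cases hg : gid = gid0
              · subst hg; exact hc'self
              · rw [hc'ne gid hg]; exact hcnew gid h1 (by simp [hg, h2]))
            (by
              intro gid h1 h2 h3
              by_cases hg : gid = gid0
              · subst hg; simp
              · exact List.mem_append_left _ (hfire gid h1 (by simp [hg, h2]) h3))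
            (by rw [hdq, List.append_assoc])
            (by
              refine List.nodup_append.mpr ⟨hnd, List.nodup_singleton _, ?_⟩
              intro a ha b hb
              simp only [List.mem_singleton] at hb
              subst hb
              exact fun heq => hdc (heq ▸ ha))
            (by
              intro y hy
              rcases List.mem_append.mp hy with h | h
              · exact hsound y h
              · simp only [List.mem_singleton] at h; subst h; exact hderiv)
            (by
              intro y hy
              rcases List.mem_append.mp hy with h | h
              · exact hkeys y h
              · simp only [List.mem_singleton] at h; subst h; exact hkey)
            (fun r hr => List.mem_append_left _ (hP r hr))
        refine ⟨ihclen, ihcnt, ihfire,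
          ⟨[pvHeadG avail rules gid0] ++ new, ?_, ?_⟩, ihnd', ihsound', ihkeys', ?_, ihP'⟩
        · rw [hq', List.append_assoc]
        · rw [hd', List.append_assoc]
        · have hlen2 : (q ++ [pvHeadG avail rules gid0]).length = q.length + 1 := by simp
          omega
    · have hcond : ((c.set gid0 (c.getD gid0 0 - 1)).getD gid0 0 == 0) = false := by
        rw [hc'self]; simp [hz]
      have hstep : pvDecr heads (c, d, q) gid0 = (c.set gid0 (c.getD gid0 0 - 1), d, q) := by
        unfold pvDecr
        simp only []
        rw [hcond]
        simp
      rw [hstep]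
      apply ih _ _ _ hrestnd
      · intro gid hgid
        obtain ⟨h1, h2, h3⟩ := hglmem gid (List.mem_cons_of_mem _ hgid)
        refine ⟨h1, h2, ?_⟩
        rw [hc'ne gid (fun h => hg0rest (h ▸ hgid)), h3]
      · rw [List.length_set]; exact hclen
      · intro gid h1 h2
        by_cases hg : gid = gid0
        · subst hg; exact hc'self
        · rw [hc'ne gid hg]; exact hcnew gid h1 (by simp [hg, h2])
      · intro gid h1 h2 h3
        by_cases hg : gid = gid0
        · exact absurd ((pvCnt_zero_iff avail rules gid0 (P ++ [x])).mpr (hg ▸ h3)) hz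
        · exact hfire gid h1 (by simp [hg, h2]) h3
      · exact hdq
      · exact hnd
      · exact hsound
      · exact hkeys
      · exact hP

-- the worklist loop: invariant propagation down to the final derived set
lemma pvLoopB_go (available : List String) (rules : List (String × List (List String)))
    (avail : PySem.Set String) (havl : avail = PySem.Set.ofList available)
    (heads : List String) (hheads : heads = (pvRegs avail rules).map Prod.fst)
    (waiting : PySem.Dict String (List Nat))
    (hwait : ∀ r, waiting.getD r [] = (List.range (pvRegs avail rules).length).filter
        (fun gid => decide (r ∈ pvUsG avail rules gid))) :
    ∀ (fuel : Nat) (count : List Int) (derived queue : List String) (i : Nat),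
      derived = avail ++ queue →
      derived.Nodup →
      (∀ y ∈ derived, PvDeriv available rules y) →
      i ≤ queue.length →
      count.length = (pvRegs avail rules).length →
      (∀ gid, gid < (pvRegs avail rules).length →
        count.getD gid 0 = (pvCnt avail rules (queue.take i) gid : Int)) →
      (∀ gid, gid < (pvRegs avail rules).length →
        (∀ r ∈ pvUsG avail rules gid, r ∈ queue.take i) → pvHeadG avail rules gid ∈ derived) →
      (∀ y ∈ queue, y ∈ pvKeys rules) →
      queue.length - i + pvMissing rules derived < fuel →
      (∀ y ∈ derived, y ∈ pvLoopB heads waiting fuel count derived queue i) ∧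
      (pvLoopB heads waiting fuel count derived queue i).Nodup ∧
      (∀ y ∈ pvLoopB heads waiting fuel count derived queue i, PvDeriv available rules y) ∧
      (∀ gid, gid < (pvRegs avail rules).length →
        (∀ r ∈ pvUsG avail rules gid, r ∈ pvLoopB heads waiting fuel count derived queue i) →
        pvHeadG avail rules gid ∈ pvLoopB heads waiting fuel count derived queue i) := by
  intro fuel
  induction fuel with
  | zero => intro count derived queue i _ _ _ _ _ _ _ _ hfuel; omega
  | succ fuel ih =>
    intro count derived queue i hdq hnd hsound hile hclen hcnt hfire hkeys hfuel
    have hL : pvLoopB heads waiting (fuel + 1) count derived queue i =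
        if i < queue.length then
          pvLoopB heads waiting fuel
            (pvStepB heads waiting (queue.getD i "") (count, derived, queue)).1
            (pvStepB heads waiting (queue.getD i "") (count, derived, queue)).2.1
            (pvStepB heads waiting (queue.getD i "") (count, derived, queue)).2.2 (i + 1)
        else derived := rfl
    by_cases hi : i < queue.length
    · -- pop x = queue[i] and process its waiting list
      rw [hL, if_pos hi]
      have hxeq : queue.getD i "" = queue[i] := List.getD_eq_getElem _ _ hi
      have hxq : queue.getD i "" ∈ queue := by rw [hxeq]; exact List.getElem_mem hi
      have hqnd : queue.Nodup := by rw [hdq] at hnd; exact hnd.of_append_right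
      have hx_take : queue.getD i "" ∉ queue.take i := by
        intro hmem
        have hnd2 : (queue.take i ++ queue.drop i).Nodup := by
          rw [List.take_append_drop]; exact hqnd
        have hxdrop : queue.getD i "" ∈ queue.drop i := by
          have hlen : 0 < (queue.drop i).length := by simp [hi]
          have hval : (queue.drop i)[0] = queue[i] := by
            rw [List.getElem_drop]
            simp
          rw [hxeq, ← hval]
          exact List.getElem_mem hlen
        exact List.disjoint_of_nodup_append hnd2 hmem hxdrop
      have hglmem : ∀ gid ∈ waiting.getD (queue.getD i "") [],
          gid < (pvRegs avail rules).length ∧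
          queue.getD i "" ∈ pvUsG avail rules gid ∧
          count.getD gid 0 = (pvCnt avail rules (queue.take i) gid : Int) := by
        intro gid hgid
        rw [hwait] at hgid
        have hsp := List.mem_filter.mp hgid
        have h1 := List.mem_range.mp hsp.1
        have h2 := of_decide_eq_true hsp.2
        exact ⟨h1, h2, hcnt gid h1⟩
      have hglnotin : ∀ gid, gid < (pvRegs avail rules).length →
          gid ∉ waiting.getD (queue.getD i "") [] → queue.getD i "" ∉ pvUsG avail rules gid := by
        intro gid h1 h2 hmem
        exact h2 (by rw [hwait]; exact List.mem_filter.mpr ⟨List.mem_range.mpr h1, by simpa using hmem⟩)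
      obtain ⟨c1, c2, c3, ⟨new, hq', hd'⟩, c5, c6, c7, c8, c9⟩ :=
        pvDecr_go available rules avail havl heads hheads (queue.take i) (queue.getD i "") hx_take
          (waiting.getD (queue.getD i "") []) count derived queue
          (by rw [hwait]; exact (List.nodup_range).filter _)
          hglmem hclen
          (by
            intro gid h1 h2
            rw [pvCnt_same avail rules gid _ _ (hglnotin gid h1 h2)]
            exact hcnt gid h1)
          (by
            intro gid h1 h2 h3
            apply hfire gid h1
            intro r hr
            rcases List.mem_append.mp (h3 r hr) with h | h
            · exact h
            · simp only [List.mem_singleton] at h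
              exact absurd (h ▸ hr) (hglnotin gid h1 h2))
          hdq hnd hsound hkeys
          (by
            intro r hr
            rcases List.mem_append.mp hr with h | h
            · rw [hdq]; exact List.mem_append_right _ (List.mem_of_mem_take h)
            · simp only [List.mem_singleton] at h; subst h; rw [hdq]
              exact List.mem_append_right _ hxq)
      have hstep : pvStepB heads waiting (queue.getD i "") (count, derived, queue) =
          (waiting.getD (queue.getD i "") []).foldl (pvDecr heads) (count, derived, queue) := rfl
      rw [hstep]
      have htake : ((waiting.getD (queue.getD i "") []).foldl (pvDecr heads)
            (count, derived, queue)).2.2.take (i + 1) = queue.take i ++ [queue.getD i ""] := by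
        rw [hq', List.take_append_of_le_length (by omega), hxeq, List.take_add_one,
          List.getElem?_eq_getElem hi]
        simp
      obtain ⟨d1, d2, d3, d4⟩ := ih _ _ _ (i + 1)
        (by rw [hd', hq', hdq, List.append_assoc])
        c5 c6
        (by rw [hq']; simp only [List.length_append]; omega)
        c1
        (by intro gid h1; rw [htake]; exact c2 gid h1)
        (by intro gid h1 h2; rw [htake] at h2; exact c3 gid h1 h2)
        c7
        (by
          have hlq : ((waiting.getD (queue.getD i "") []).foldl (pvDecr heads)
              (count, derived, queue)).2.2.length = queue.length + new.length := by
            rw [hq', List.length_append]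
          omega)
      exact ⟨fun y hy => d1 y (by rw [hd']; exact List.mem_append_left _ hy), d2, d3, d4⟩
    · -- queue exhausted: the derived set is final and closed
      rw [hL, if_neg hi]
      have hieq : i = queue.length := by omega
      refine ⟨fun y hy => hy, hnd, hsound, ?_⟩
      intro gid h1 h2
      apply hfire gid h1
      intro r hr
      have hrd := h2 r hr
      rw [hieq, List.take_length]
      rw [hdq] at hrd
      rcases List.mem_append.mp hrd with h | h
      · exact absurd h (pvUns_sub avail _ r hr).2
      · exact h

lemma pvCnt_nil (avail : PySem.Set String) (rules : List (String × List (List String)))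
    (gid : Nat) : pvCnt avail rules ([] : List String) gid = (pvUsG avail rules gid).length := by
  unfold pvCnt
  congr 1
  apply List.filter_eq_self.mpr
  intro r _
  simp

-- the B-side port computes exactly the set of derivable ids
lemma pvB_char (available : List String) (rules : List (String × List (List String))) :
    (pvLoopB (pvInitB (PySem.Set.ofList available) rules).heads
        (pvInitB (PySem.Set.ofList available) rules).waiting (rules.length + 1)
        (pvInitB (PySem.Set.ofList available) rules).count
        (pvInitB (PySem.Set.ofList available) rules).derived
        (pvInitB (PySem.Set.ofList available) rules).queue 0).Nodup ∧
    (∀ x, x ∈ pvLoopB (pvInitB (PySem.Set.ofList available) rules).heads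
        (pvInitB (PySem.Set.ofList available) rules).waiting (rules.length + 1)
        (pvInitB (PySem.Set.ofList available) rules).count
        (pvInitB (PySem.Set.ofList available) rules).derived
        (pvInitB (PySem.Set.ofList available) rules).queue 0 ↔ PvDeriv available rules x) := by
  obtain ⟨ihh, ihc, ihw, ihd, ihnd, ihq, ihf⟩ :=
    pvInit_go (PySem.Set.ofList available) (PySem.Set.nodup_ofList _) (pvPairs rules)
  rw [← pvInitB_eq (PySem.Set.ofList available) rules] at ihh ihc ihw ihd ihnd ihq ihf
  have hregs : (pvPairs rules).filter
      (fun pg => !(pvUns (PySem.Set.ofList available) pg.2).isEmpty) =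
      pvRegs (PySem.Set.ofList available) rules := rfl
  rw [hregs] at ihh ihc ihw
  have hsound0 : ∀ y ∈ (pvInitB (PySem.Set.ofList available) rules).derived,
      PvDeriv available rules y := by
    intro y hy
    rw [ihd] at hy
    rcases List.mem_append.mp hy with h | h
    · exact PvDeriv.base y ((PySem.Set.mem_ofList _ _).mp h)
    · obtain ⟨pg, hpg, heq, hemp⟩ := ihq y h
      subst heq
      apply pvDeriv_of_group available rules pg.1 pg.2 (by simpa using hpg)
      intro r hr
      rcases pvUns_cover (PySem.Set.ofList available) pg.2 r hr with h2 | h2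
      · exact PvDeriv.base r ((PySem.Set.mem_ofList _ _).mp h2)
      · rw [List.isEmpty_iff.mp hemp] at h2
        exact absurd h2 (List.not_mem_nil)
  have hkeys0 : ∀ y ∈ (pvInitB (PySem.Set.ofList available) rules).queue, y ∈ pvKeys rules := by
    intro y hy
    obtain ⟨pg, hpg, heq, _⟩ := ihq y hy
    obtain ⟨gs, h1, _⟩ := pvPairs_mem hpg
    rw [← heq]
    unfold pvKeys
    exact List.mem_map_of_mem h1
  have hq0nd : (pvInitB (PySem.Set.ofList available) rules).queue.Nodup := by
    rw [ihd] at ihnd; exact ihnd.of_append_right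
  have hfuel : (pvInitB (PySem.Set.ofList available) rules).queue.length - 0 +
      pvMissing rules (pvInitB (PySem.Set.ofList available) rules).derived <
      rules.length + 1 := by
    have hcard : (pvInitB (PySem.Set.ofList available) rules).queue.toFinset.card =
        (pvInitB (PySem.Set.ofList available) rules).queue.length :=
      List.toFinset_card_of_nodup hq0nd
    have hdisj : Disjoint (pvInitB (PySem.Set.ofList available) rules).queue.toFinset
        ((pvKeys rules).toFinset \
          (pvInitB (PySem.Set.ofList available) rules).derived.toFinset) := by
      rw [Finset.disjoint_left]
      intro y hy hyB
      simp only [Finset.mem_sdiff, List.mem_toFinset] at hy hyB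
      exact hyB.2 (by rw [ihd]; exact List.mem_append_right _ hy)
    have hunion : (pvInitB (PySem.Set.ofList available) rules).queue.toFinset ∪
        ((pvKeys rules).toFinset \
          (pvInitB (PySem.Set.ofList available) rules).derived.toFinset) ⊆
        (pvKeys rules).toFinset := by
      intro y hy
      rcases Finset.mem_union.mp hy with h | h
      · simp only [List.mem_toFinset] at h ⊢
        exact hkeys0 y h
      · exact (Finset.mem_sdiff.mp h).1
    have hcu := Finset.card_union_of_disjoint hdisj
    have hle := Finset.card_le_card hunion
    have hkf : (pvKeys rules).toFinset.card ≤ rules.length := by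
      calc (pvKeys rules).toFinset.card ≤ (pvKeys rules).length := List.toFinset_card_le _
        _ = rules.length := List.length_map ..
    unfold pvMissing
    omega
  obtain ⟨cl1, cl2, cl3, cl4⟩ :=
    pvLoopB_go available rules (PySem.Set.ofList available) rfl
      (pvInitB (PySem.Set.ofList available) rules).heads ihh
      (pvInitB (PySem.Set.ofList available) rules).waiting ihw
      (rules.length + 1)
      (pvInitB (PySem.Set.ofList available) rules).count
      (pvInitB (PySem.Set.ofList available) rules).derived
      (pvInitB (PySem.Set.ofList available) rules).queue 0
      ihd ihnd hsound0 (Nat.zero_le _)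
      (by rw [ihc, List.length_map])
      (by
        intro gid h1
        rw [List.take_zero, ihc]
        rw [List.getD_eq_getElem _ _ (by rw [List.length_map]; exact h1), List.getElem_map,
          pvCnt_nil, pvUsG, List.getD_eq_getElem _ _ h1])
      (by
        intro gid h1 h2
        exfalso
        have hmem := pvRegs_getD_mem (PySem.Set.ofList available) rules gid h1
        have hne : (pvUns (PySem.Set.ofList available)
            (((pvRegs (PySem.Set.ofList available) rules).getD gid ("", [])).2)).isEmpty = false := by
          simpa using List.of_mem_filter hmem
        have hnonempty : pvUsG (PySem.Set.ofList available) rules gid ≠ [] := by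
          intro h
          unfold pvUsG at h
          rw [h] at hne
          simp at hne
        obtain ⟨r, hr⟩ := List.exists_mem_of_ne_nil _ hnonempty
        exact absurd (h2 r hr) (List.not_mem_nil))
      hkeys0 hfuel
  have hsub0 : ∀ y ∈ (pvInitB (PySem.Set.ofList available) rules).derived,
      y ∈ pvLoopB (pvInitB (PySem.Set.ofList available) rules).heads
        (pvInitB (PySem.Set.ofList available) rules).waiting (rules.length + 1)
        (pvInitB (PySem.Set.ofList available) rules).count
        (pvInitB (PySem.Set.ofList available) rules).derived
        (pvInitB (PySem.Set.ofList available) rules).queue 0 := cl1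
  have hclosed : pvClosed rules (pvLoopB (pvInitB (PySem.Set.ofList available) rules).heads
      (pvInitB (PySem.Set.ofList available) rules).waiting (rules.length + 1)
      (pvInitB (PySem.Set.ofList available) rules).count
      (pvInitB (PySem.Set.ofList available) rules).derived
      (pvInitB (PySem.Set.ofList available) rules).queue 0) := by
    intro p hp g hg hsat
    have hpair : (p.1, g) ∈ pvPairs rules :=
      pvPairs_mem_of rules p.1 p.2 g (by simpa using hp) hg
    by_cases he : (pvUns (PySem.Set.ofList available) g).isEmpty = true
    · exact hsub0 _ (ihf (p.1, g) hpair he)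
    · have hreg : (p.1, g) ∈ pvRegs (PySem.Set.ofList available) rules :=
        List.mem_filter.mpr ⟨hpair, by simp [he]⟩
      obtain ⟨gid, hlt, hgetElem⟩ := List.mem_iff_getElem.mp hreg
      have hgetD : (pvRegs (PySem.Set.ofList available) rules).getD gid ("", []) = (p.1, g) := by
        rw [List.getD_eq_getElem _ _ hlt, hgetElem]
      have hhead : pvHeadG (PySem.Set.ofList available) rules gid = p.1 := by
        rw [pvHeadG, hgetD]
      rw [← hhead]
      apply cl4 gid hlt
      intro r hr
      rw [pvUsG, hgetD] at hr
      exact hsat r (pvUns_sub _ _ _ hr).1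
  have hav : ∀ x ∈ available,
      x ∈ pvLoopB (pvInitB (PySem.Set.ofList available) rules).heads
        (pvInitB (PySem.Set.ofList available) rules).waiting (rules.length + 1)
        (pvInitB (PySem.Set.ofList available) rules).count
        (pvInitB (PySem.Set.ofList available) rules).derived
        (pvInitB (PySem.Set.ofList available) rules).queue 0 := by
    intro x hx
    apply hsub0
    rw [ihd]
    exact List.mem_append_left _ ((PySem.Set.mem_ofList _ _).mpr hx)
  exact ⟨cl2, fun x => ⟨cl3 x, fun h => pvComplete available rules _ hav hclosed x h⟩⟩

-- ===== VERDICT (by name: the statement is the Claim_ definition above) =====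
theorem derivable_from_py_spec : Claim_equal_derivable_from_py := by
  intro available dc _
  unfold Spec_derivable_from_py
  show PySem.List.sorted (PySem.Set.diff
      (pvLoopA dc (dc.length + 1) (PySem.Set.ofList available)) (PySem.Set.ofList available))
      (fun x => x) false =
    PySem.List.sorted (PySem.Set.diff
      (pvLoopB (pvInitB (PySem.Set.ofList available) dc).heads
        (pvInitB (PySem.Set.ofList available) dc).waiting (dc.length + 1)
        (pvInitB (PySem.Set.ofList available) dc).count
        (pvInitB (PySem.Set.ofList available) dc).derived
        (pvInitB (PySem.Set.ofList available) dc).queue 0) (PySem.Set.ofList available))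
      (fun x => x) false
  obtain ⟨hndA, hA⟩ := pvA_char available dc
  obtain ⟨hndB, hB⟩ := pvB_char available dc
  apply PySem.List.sorted_eq_sorted_of_perm _ _ _ (fun a b h => h)
  apply (List.perm_ext_iff_of_nodup (PySem.Set.nodup_diff _ _ hndA)
    (PySem.Set.nodup_diff _ _ hndB)).mpr
  intro a
  rw [PySem.Set.mem_diff, PySem.Set.mem_diff, hA a, hB a]
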